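-- pv_equiv track=rewrite | github.com/Harmon758/Harmonbot | units/trivia.py | remove_preceding_words
-- ===== SOURCE A (Python) =====
-- def remove_preceding_words(string: str) -> str:
--     for word in (
--         ("a ", "an ", "the ") +  # articles
--         ("her ", "his ", "its ", "their ", "your ") +  # possessive determiners
--         ("to ",) +  # prepositions
--         ("dr ", "sir ")  # honorifics
--     ):
--         if string.startswith(word):
--             return string[len(word):]
--     return string
-- ===== SOURCE B (Python) =====
-- # B: a precomputed trie/DFA over the prefix words, walked character by character,
-- # instead of A's eleven sequential startswith checks.
-- _WORDS = ("a ", "an ", "the ", "her ", "his ", "its ", "their ", "your ", "to ", "dr ", "sir ")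
--
-- _TRANS = {}
-- _ACCEPT = set()
-- _count = 1
-- for _w in _WORDS:
--     _s = 0
--     for _c in _w:
--         _t = _TRANS.get((_s, _c))
--         if _t is None:
--             _t = _count
--             _TRANS[(_s, _c)] = _t
--             _count += 1
--         _s = _t
--     _ACCEPT.add(_s)
--
--
-- def remove_preceding_words(string: str) -> str:
--     # Walk the trie; since no word is a prefix of another, the first accepting
--     # state reached corresponds to the unique matching word.
--     state = 0
--     for i, c in enumerate(string):
--         state = _TRANS.get((state, c))
--         if state is None:
--             return string
--         if state in _ACCEPT:
--             return string[i + 1:]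
--     return string
-- ===== Notes on version B (the rewrite author's own statement) =====
-- stated objective: alternative
-- what changed: B precomputes a trie/DFA (transition dict keyed by (state, char) plus a set of accepting states) from the same word list and strips the prefix by walking the input one character at a time, instead of A's eleven sequential startswith tests; this is correct because no word is a prefix of another, so at most one word can match and the first accepting state reached identifies it.
import Mathlib
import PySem

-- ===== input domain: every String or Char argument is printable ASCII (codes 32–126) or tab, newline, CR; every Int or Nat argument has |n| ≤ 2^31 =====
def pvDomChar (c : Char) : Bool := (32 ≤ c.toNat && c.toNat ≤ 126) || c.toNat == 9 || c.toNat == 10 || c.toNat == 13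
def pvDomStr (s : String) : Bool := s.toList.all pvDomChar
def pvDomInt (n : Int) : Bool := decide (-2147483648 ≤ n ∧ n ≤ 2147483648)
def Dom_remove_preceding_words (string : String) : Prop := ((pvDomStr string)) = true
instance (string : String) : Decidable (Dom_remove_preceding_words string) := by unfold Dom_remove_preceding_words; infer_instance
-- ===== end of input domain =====

set_option maxRecDepth 65536

-- B replaces A's eleven sequential startswith checks by a precomputed trie/DFA
-- over the same words, walked character by character (objective: alternative).

-- ===== PORT A =====
-- the tuple of words A iterates over, in A's order
def pvWordsA : List String :=
  ["a ", "an ", "the ", "her ", "his ", "its ", "their ", "your ", "to ", "dr ", "sir "]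

-- A's for-loop with early return
def pvStripLoop : List String → String → String
  | [], s => s
  | w :: ws, s =>
    if PySem.Str.startswith s w then PySem.Str.slice s (some (PySem.Str.len w)) none
    else pvStripLoop ws s

def remove_preceding_words (string : String) : String :=
  pvStripLoop pvWordsA string

-- ===== PORT B =====
-- Source B's _WORDS tuple
def pvWordsB : List String :=
  ["a ", "an ", "the ", "her ", "his ", "its ", "their ", "your ", "to ", "dr ", "sir "]

-- the module-level build loop of Source B: fold the words into (_TRANS, _ACCEPT, _count)
def pvBuild : PySem.Dict (Int × Char) Int × PySem.Set Int × Int :=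
  pvWordsB.foldl
    (fun acc w =>
      let inner := w.toList.foldl
        (fun (p : PySem.Dict (Int × Char) Int × Int × Int) c =>
          match (p.1).get? (p.2.2, c) with
          | some t => (p.1, p.2.1, t)
          | none => ((p.1).insert (p.2.2, c) p.2.1, p.2.1 + 1, p.2.1))
        (acc.1, acc.2.2, 0)
      (inner.1, PySem.Set.add acc.2.1 inner.2.2, inner.2.1))
    (PySem.Dict.empty, PySem.Set.empty, 1)

def pvTrans : PySem.Dict (Int × Char) Int := pvBuild.1
def pvAccept : PySem.Set Int := pvBuild.2.1

-- Source B's for-loop over (i, c): carries the remaining characters instead of the index i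
def pvWalk : List Char → Int → Option (List Char)
  | [], _ => none
  | c :: rest, s =>
    match pvTrans.get? (s, c) with
    | none => none                                  -- return string
    | some s' =>
      if PySem.Set.contains pvAccept s' then some rest   -- return string[i+1:]
      else pvWalk rest s'

def remove_preceding_words_alt (string : String) : String :=
  match pvWalk string.toList 0 with
  | none => string
  | some t => String.ofList t

-- ===== PRECONDITION & SPEC =====
def Spec_remove_preceding_words (string : String) (out : String) : Prop := out = remove_preceding_words_alt string
instance (string : String) (out : String) : Decidable (Spec_remove_preceding_words string out) := by unfold Spec_remove_preceding_words; infer_instance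

-- ===== CLAIM (what is proved, stated in full; the proofs are below) =====
def Claim_equal_remove_preceding_words : Prop := ∀ (string : String), Dom_remove_preceding_words string → Spec_remove_preceding_words string (remove_preceding_words string)

-- ===== LEMMAS AND PROOFS =====

-- the words, as character lists
def pvWordChars : List (List Char) :=
  [['a', ' '], ['a', 'n', ' '], ['t', 'h', 'e', ' '], ['h', 'e', 'r', ' '], ['h', 'i', 's', ' '], ['i', 't', 's', ' '], ['t', 'h', 'e', 'i', 'r', ' '], ['y', 'o', 'u', 'r', ' '], ['t', 'o', ' '], ['d', 'r', ' '], ['s', 'i', 'r', ' ']]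

-- the unique path of characters leading from the root to each trie state
def pvPathOf : Int → List Char
  | 0 => []
  | 1 => ['a']
  | 2 => ['a', ' ']
  | 3 => ['a', 'n']
  | 4 => ['a', 'n', ' ']
  | 5 => ['t']
  | 6 => ['t', 'h']
  | 7 => ['t', 'h', 'e']
  | 8 => ['t', 'h', 'e', ' ']
  | 9 => ['h']
  | 10 => ['h', 'e']
  | 11 => ['h', 'e', 'r']
  | 12 => ['h', 'e', 'r', ' ']
  | 13 => ['h', 'i']
  | 14 => ['h', 'i', 's']
  | 15 => ['h', 'i', 's', ' ']
  | 16 => ['i']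
  | 17 => ['i', 't']
  | 18 => ['i', 't', 's']
  | 19 => ['i', 't', 's', ' ']
  | 20 => ['t', 'h', 'e', 'i']
  | 21 => ['t', 'h', 'e', 'i', 'r']
  | 22 => ['t', 'h', 'e', 'i', 'r', ' ']
  | 23 => ['y']
  | 24 => ['y', 'o']
  | 25 => ['y', 'o', 'u']
  | 26 => ['y', 'o', 'u', 'r']
  | 27 => ['y', 'o', 'u', 'r', ' ']
  | 28 => ['t', 'o']
  | 29 => ['t', 'o', ' ']
  | 30 => ['d']
  | 31 => ['d', 'r']
  | 32 => ['d', 'r', ' ']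
  | 33 => ['s']
  | 34 => ['s', 'i']
  | 35 => ['s', 'i', 'r']
  | 36 => ['s', 'i', 'r', ' ']
  | _ => []

-- the built transition table, as a literal
theorem pvTrans_items : pvTrans.items = [((0, 'a'), 1), ((1, ' '), 2), ((1, 'n'), 3), ((3, ' '), 4), ((0, 't'), 5), ((5, 'h'), 6), ((6, 'e'), 7), ((7, ' '), 8), ((0, 'h'), 9), ((9, 'e'), 10), ((10, 'r'), 11), ((11, ' '), 12), ((9, 'i'), 13), ((13, 's'), 14), ((14, ' '), 15), ((0, 'i'), 16), ((16, 't'), 17), ((17, 's'), 18), ((18, ' '), 19), ((7, 'i'), 20), ((20, 'r'), 21), ((21, ' '), 22), ((0, 'y'), 23), ((23, 'o'), 24), ((24, 'u'), 25), ((25, 'r'), 26), ((26, ' '), 27), ((5, 'o'), 28), ((28, ' '), 29), ((0, 'd'), 30), ((30, 'r'), 31), ((31, ' '), 32), ((0, 's'), 33), ((33, 'i'), 34), ((34, 'r'), 35), ((35, ' '), 36)] := by decide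

-- every edge (s, c) ↦ s' of the trie extends the path by c
theorem pv_edge (s : Int) (c : Char) (s' : Int) (h : pvTrans.get? (s, c) = some s') :
    pvPathOf s' = pvPathOf s ++ [c] := by
  have hm := PySem.Dict.mem_items_of_get?_eq_some pvTrans h
  rw [pvTrans_items] at hm
  simp only [List.mem_cons, List.not_mem_nil, or_false, Prod.mk.injEq] at hm
  rcases hm with ⟨⟨rfl,rfl⟩,rfl⟩|⟨⟨rfl,rfl⟩,rfl⟩|⟨⟨rfl,rfl⟩,rfl⟩|⟨⟨rfl,rfl⟩,rfl⟩|⟨⟨rfl,rfl⟩,rfl⟩|⟨⟨rfl,rfl⟩,rfl⟩|⟨⟨rfl,rfl⟩,rfl⟩|⟨⟨rfl,rfl⟩,rfl⟩|⟨⟨rfl,rfl⟩,rfl⟩|⟨⟨rfl,rfl⟩,rfl⟩|⟨⟨rfl,rfl⟩,rfl⟩|⟨⟨rfl,rfl⟩,rfl⟩|⟨⟨rfl,rfl⟩,rfl⟩|⟨⟨rfl,rfl⟩,rfl⟩|⟨⟨rfl,rfl⟩,rfl⟩|⟨⟨rfl,rfl⟩,rfl⟩|⟨⟨rfl,rfl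⟩,rfl⟩|⟨⟨rfl,rfl⟩,rfl⟩|⟨⟨rfl,rfl⟩,rfl⟩|⟨⟨rfl,rfl⟩,rfl⟩|⟨⟨rfl,rfl⟩,rfl⟩|⟨⟨rfl,rfl⟩,rfl⟩|⟨⟨rfl,rfl⟩,rfl⟩|⟨⟨rfl,rfl⟩,rfl⟩|⟨⟨rfl,rfl⟩,rfl⟩|⟨⟨rfl,rfl⟩,rfl⟩|⟨⟨rfl,rfl⟩,rfl⟩|⟨⟨rfl,rfl⟩,rfl⟩|⟨⟨rfl,rfl⟩,rfl⟩|⟨⟨rfl,rfl⟩,rfl⟩|⟨⟨rfl,rfl⟩,rfl⟩|⟨⟨rfl,rfl⟩,rfl⟩|⟨⟨rfl,rfl⟩,rfl⟩|⟨⟨rfl,rfl⟩,rfl⟩|⟨⟨rfl,rfl⟩,rfl⟩|⟨⟨rfl,rfl⟩,rfl⟩ <;> rfl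

-- every accepting state's path is one of the words
theorem pv_accept (s : Int) (h : PySem.Set.contains pvAccept s = true) :
    pvPathOf s ∈ pvWordChars := by
  have hm : s ∈ (pvAccept : List Int) := by
    simpa [PySem.Set.contains] using h
  have : pvAccept = ([2, 4, 8, 12, 15, 19, 22, 27, 29, 32, 36] : List Int) := by decide
  rw [this] at hm
  simp only [List.mem_cons, List.not_mem_nil, or_false] at hm
  rcases hm with rfl|rfl|rfl|rfl|rfl|rfl|rfl|rfl|rfl|rfl|rfl <;> decide

-- soundness of the walk: an accepted split consumes exactly one of the words
theorem pv_walk_sound (l : List Char) (s : Int) (t : List Char)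
    (h : pvWalk l s = some t) :
    ∃ p, l = p ++ t ∧ pvPathOf s ++ p ∈ pvWordChars := by
  induction l generalizing s with
  | nil => simp [pvWalk] at h
  | cons c rest ih =>
    rw [pvWalk] at h
    cases hg : pvTrans.get? (s, c) with
    | none => rw [hg] at h; exact absurd h (by simp)
    | some s' =>
      rw [hg] at h
      dsimp only at h
      by_cases ha : PySem.Set.contains pvAccept s' = true
      · rw [if_pos ha] at h
        obtain rfl : rest = t := by injection h
        refine ⟨[c], rfl, ?_⟩
        rw [← pv_edge s c s' hg]
        exact pv_accept s' ha
      · rw [if_neg ha] at h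
        obtain ⟨p, rfl, hmem⟩ := ih s' h
        refine ⟨c :: p, rfl, ?_⟩
        have : pvPathOf s ++ (c :: p) = pvPathOf s' ++ p := by
          rw [pv_edge s c s' hg]; simp
        rw [this]; exact hmem

-- completeness: the walk from the root accepts each word, returning the remainder
theorem pv_walk_w0 (t : List Char) : pvWalk (['a', ' '] ++ t) 0 = some t := by
  simp only [List.cons_append, List.nil_append, pvWalk,
    show PySem.Dict.get? pvTrans (0, 'a') = some 1 from by decide,
    show PySem.Set.contains pvAccept 1 = false from by decide,
    show PySem.Dict.get? pvTrans (1, ' ') = some 2 from by decide,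
    show PySem.Set.contains pvAccept 2 = true from by decide,
    if_pos, if_neg, Bool.false_eq_true, not_false_iff]

theorem pv_walk_w1 (t : List Char) : pvWalk (['a', 'n', ' '] ++ t) 0 = some t := by
  simp only [List.cons_append, List.nil_append, pvWalk,
    show PySem.Dict.get? pvTrans (0, 'a') = some 1 from by decide,
    show PySem.Set.contains pvAccept 1 = false from by decide,
    show PySem.Dict.get? pvTrans (1, 'n') = some 3 from by decide,
    show PySem.Set.contains pvAccept 3 = false from by decide,
    show PySem.Dict.get? pvTrans (3, ' ') = some 4 from by decide,
    show PySem.Set.contains pvAccept 4 = true from by decide,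
    if_pos, if_neg, Bool.false_eq_true, not_false_iff]

theorem pv_walk_w2 (t : List Char) : pvWalk (['t', 'h', 'e', ' '] ++ t) 0 = some t := by
  simp only [List.cons_append, List.nil_append, pvWalk,
    show PySem.Dict.get? pvTrans (0, 't') = some 5 from by decide,
    show PySem.Set.contains pvAccept 5 = false from by decide,
    show PySem.Dict.get? pvTrans (5, 'h') = some 6 from by decide,
    show PySem.Set.contains pvAccept 6 = false from by decide,
    show PySem.Dict.get? pvTrans (6, 'e') = some 7 from by decide,
    show PySem.Set.contains pvAccept 7 = false from by decide,
    show PySem.Dict.get? pvTrans (7, ' ') = some 8 from by decide,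
    show PySem.Set.contains pvAccept 8 = true from by decide,
    if_pos, if_neg, Bool.false_eq_true, not_false_iff]

theorem pv_walk_w3 (t : List Char) : pvWalk (['h', 'e', 'r', ' '] ++ t) 0 = some t := by
  simp only [List.cons_append, List.nil_append, pvWalk,
    show PySem.Dict.get? pvTrans (0, 'h') = some 9 from by decide,
    show PySem.Set.contains pvAccept 9 = false from by decide,
    show PySem.Dict.get? pvTrans (9, 'e') = some 10 from by decide,
    show PySem.Set.contains pvAccept 10 = false from by decide,
    show PySem.Dict.get? pvTrans (10, 'r') = some 11 from by decide,
    show PySem.Set.contains pvAccept 11 = false from by decide,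
    show PySem.Dict.get? pvTrans (11, ' ') = some 12 from by decide,
    show PySem.Set.contains pvAccept 12 = true from by decide,
    if_pos, if_neg, Bool.false_eq_true, not_false_iff]

theorem pv_walk_w4 (t : List Char) : pvWalk (['h', 'i', 's', ' '] ++ t) 0 = some t := by
  simp only [List.cons_append, List.nil_append, pvWalk,
    show PySem.Dict.get? pvTrans (0, 'h') = some 9 from by decide,
    show PySem.Set.contains pvAccept 9 = false from by decide,
    show PySem.Dict.get? pvTrans (9, 'i') = some 13 from by decide,
    show PySem.Set.contains pvAccept 13 = false from by decide,
    show PySem.Dict.get? pvTrans (13, 's') = some 14 from by decide,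
    show PySem.Set.contains pvAccept 14 = false from by decide,
    show PySem.Dict.get? pvTrans (14, ' ') = some 15 from by decide,
    show PySem.Set.contains pvAccept 15 = true from by decide,
    if_pos, if_neg, Bool.false_eq_true, not_false_iff]

theorem pv_walk_w5 (t : List Char) : pvWalk (['i', 't', 's', ' '] ++ t) 0 = some t := by
  simp only [List.cons_append, List.nil_append, pvWalk,
    show PySem.Dict.get? pvTrans (0, 'i') = some 16 from by decide,
    show PySem.Set.contains pvAccept 16 = false from by decide,
    show PySem.Dict.get? pvTrans (16, 't') = some 17 from by decide,
    show PySem.Set.contains pvAccept 17 = false from by decide,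
    show PySem.Dict.get? pvTrans (17, 's') = some 18 from by decide,
    show PySem.Set.contains pvAccept 18 = false from by decide,
    show PySem.Dict.get? pvTrans (18, ' ') = some 19 from by decide,
    show PySem.Set.contains pvAccept 19 = true from by decide,
    if_pos, if_neg, Bool.false_eq_true, not_false_iff]

theorem pv_walk_w6 (t : List Char) : pvWalk (['t', 'h', 'e', 'i', 'r', ' '] ++ t) 0 = some t := by
  simp only [List.cons_append, List.nil_append, pvWalk,
    show PySem.Dict.get? pvTrans (0, 't') = some 5 from by decide,
    show PySem.Set.contains pvAccept 5 = false from by decide,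
    show PySem.Dict.get? pvTrans (5, 'h') = some 6 from by decide,
    show PySem.Set.contains pvAccept 6 = false from by decide,
    show PySem.Dict.get? pvTrans (6, 'e') = some 7 from by decide,
    show PySem.Set.contains pvAccept 7 = false from by decide,
    show PySem.Dict.get? pvTrans (7, 'i') = some 20 from by decide,
    show PySem.Set.contains pvAccept 20 = false from by decide,
    show PySem.Dict.get? pvTrans (20, 'r') = some 21 from by decide,
    show PySem.Set.contains pvAccept 21 = false from by decide,
    show PySem.Dict.get? pvTrans (21, ' ') = some 22 from by decide,
    show PySem.Set.contains pvAccept 22 = true from by decide,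
    if_pos, if_neg, Bool.false_eq_true, not_false_iff]

theorem pv_walk_w7 (t : List Char) : pvWalk (['y', 'o', 'u', 'r', ' '] ++ t) 0 = some t := by
  simp only [List.cons_append, List.nil_append, pvWalk,
    show PySem.Dict.get? pvTrans (0, 'y') = some 23 from by decide,
    show PySem.Set.contains pvAccept 23 = false from by decide,
    show PySem.Dict.get? pvTrans (23, 'o') = some 24 from by decide,
    show PySem.Set.contains pvAccept 24 = false from by decide,
    show PySem.Dict.get? pvTrans (24, 'u') = some 25 from by decide,
    show PySem.Set.contains pvAccept 25 = false from by decide,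
    show PySem.Dict.get? pvTrans (25, 'r') = some 26 from by decide,
    show PySem.Set.contains pvAccept 26 = false from by decide,
    show PySem.Dict.get? pvTrans (26, ' ') = some 27 from by decide,
    show PySem.Set.contains pvAccept 27 = true from by decide,
    if_pos, if_neg, Bool.false_eq_true, not_false_iff]

theorem pv_walk_w8 (t : List Char) : pvWalk (['t', 'o', ' '] ++ t) 0 = some t := by
  simp only [List.cons_append, List.nil_append, pvWalk,
    show PySem.Dict.get? pvTrans (0, 't') = some 5 from by decide,
    show PySem.Set.contains pvAccept 5 = false from by decide,
    show PySem.Dict.get? pvTrans (5, 'o') = some 28 from by decide,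
    show PySem.Set.contains pvAccept 28 = false from by decide,
    show PySem.Dict.get? pvTrans (28, ' ') = some 29 from by decide,
    show PySem.Set.contains pvAccept 29 = true from by decide,
    if_pos, if_neg, Bool.false_eq_true, not_false_iff]

theorem pv_walk_w9 (t : List Char) : pvWalk (['d', 'r', ' '] ++ t) 0 = some t := by
  simp only [List.cons_append, List.nil_append, pvWalk,
    show PySem.Dict.get? pvTrans (0, 'd') = some 30 from by decide,
    show PySem.Set.contains pvAccept 30 = false from by decide,
    show PySem.Dict.get? pvTrans (30, 'r') = some 31 from by decide,
    show PySem.Set.contains pvAccept 31 = false from by decide,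
    show PySem.Dict.get? pvTrans (31, ' ') = some 32 from by decide,
    show PySem.Set.contains pvAccept 32 = true from by decide,
    if_pos, if_neg, Bool.false_eq_true, not_false_iff]

theorem pv_walk_w10 (t : List Char) : pvWalk (['s', 'i', 'r', ' '] ++ t) 0 = some t := by
  simp only [List.cons_append, List.nil_append, pvWalk,
    show PySem.Dict.get? pvTrans (0, 's') = some 33 from by decide,
    show PySem.Set.contains pvAccept 33 = false from by decide,
    show PySem.Dict.get? pvTrans (33, 'i') = some 34 from by decide,
    show PySem.Set.contains pvAccept 34 = false from by decide,
    show PySem.Dict.get? pvTrans (34, 'r') = some 35 from by decide,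
    show PySem.Set.contains pvAccept 35 = false from by decide,
    show PySem.Dict.get? pvTrans (35, ' ') = some 36 from by decide,
    show PySem.Set.contains pvAccept 36 = true from by decide,
    if_pos, if_neg, Bool.false_eq_true, not_false_iff]


-- the matched case, one lemma per word shape
theorem pv_matched (w : String) (string : String) (k : Nat) (hk : PySem.Str.len w = (k : Int))
    (t : List Char) (hsplit : string.toList = w.toList ++ t)
    (hwalk : pvWalk string.toList 0 = some t) :
    PySem.Str.slice string (some (PySem.Str.len w)) none = remove_preceding_words_alt string := by
  unfold remove_preceding_words_alt
  rw [hwalk]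
  apply String.toList_inj.mp
  rw [PySem.Str.toList_slice, PySem.Chars.slice_eq_listSlice, hk,
    PySem.List.slice_from_natCast, hsplit]
  have hlen : w.toList.length = k := by
    have := PySem.Str.len_eq w
    rw [hk] at this; exact_mod_cast this.symm
  simp [← hlen]

-- the fallthrough case: if no word is a prefix, the walk cannot accept
theorem pv_fallthrough (string : String)
    (hall : ∀ w ∈ pvWordsA, ¬ PySem.Str.startswith string w = true) :
    string = remove_preceding_words_alt string := by
  unfold remove_preceding_words_alt
  cases hw : pvWalk string.toList 0 with
  | none => rfl
  | some t =>
    exfalso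
    obtain ⟨p, hsplit, hmem⟩ := pv_walk_sound string.toList 0 t hw
    simp only [pvPathOf, List.nil_append] at hmem
    have hpre : ∃ w ∈ pvWordsA, w.toList = p := by
      unfold pvWordChars at hmem
      simp only [List.mem_cons, List.not_mem_nil, or_false] at hmem
      rcases hmem with rfl|rfl|rfl|rfl|rfl|rfl|rfl|rfl|rfl|rfl|rfl
      exacts [⟨"a ", by decide, by decide⟩, ⟨"an ", by decide, by decide⟩,
        ⟨"the ", by decide, by decide⟩, ⟨"her ", by decide, by decide⟩,
        ⟨"his ", by decide, by decide⟩, ⟨"its ", by decide, by decide⟩,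
        ⟨"their ", by decide, by decide⟩, ⟨"your ", by decide, by decide⟩,
        ⟨"to ", by decide, by decide⟩, ⟨"dr ", by decide, by decide⟩,
        ⟨"sir ", by decide, by decide⟩]
    obtain ⟨w, hwmem, hwp⟩ := hpre
    refine hall w hwmem ?_
    rw [PySem.Str.startswith_eq]
    apply List.isPrefixOf_iff_prefix.mpr
    rw [hsplit, hwp]
    exact ⟨t, rfl⟩

-- startswith gives the split of the character list
theorem pv_split (string w : String) (h : PySem.Str.startswith string w = true) :
    ∃ t, string.toList = w.toList ++ t := by
  rw [PySem.Str.startswith_eq] at h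
  obtain ⟨t, ht⟩ := List.isPrefixOf_iff_prefix.mp h
  exact ⟨t, ht.symm⟩

-- ===== VERDICT (by name: the statement is the Claim_ definition above) =====
set_option maxHeartbeats 2000000 in
theorem remove_preceding_words_spec : Claim_equal_remove_preceding_words := by
  intro string _
  unfold Spec_remove_preceding_words remove_preceding_words pvWordsA
  simp only [pvStripLoop]
  split_ifs with h1 h2 h3 h4 h5 h6 h7 h8 h9 h10 h11
  · obtain ⟨t, ht⟩ := pv_split string "a " h1
    exact pv_matched "a " string 2 (by decide) t ht
      (by rw [ht]; exact pv_walk_w0 t)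
  · obtain ⟨t, ht⟩ := pv_split string "an " h2
    exact pv_matched "an " string 3 (by decide) t ht
      (by rw [ht]; exact pv_walk_w1 t)
  · obtain ⟨t, ht⟩ := pv_split string "the " h3
    exact pv_matched "the " string 4 (by decide) t ht
      (by rw [ht]; exact pv_walk_w2 t)
  · obtain ⟨t, ht⟩ := pv_split string "her " h4
    exact pv_matched "her " string 4 (by decide) t ht
      (by rw [ht]; exact pv_walk_w3 t)
  · obtain ⟨t, ht⟩ := pv_split string "his " h5
    exact pv_matched "his " string 4 (by decide) t ht
      (by rw [ht]; exact pv_walk_w4 t)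
  · obtain ⟨t, ht⟩ := pv_split string "its " h6
    exact pv_matched "its " string 4 (by decide) t ht
      (by rw [ht]; exact pv_walk_w5 t)
  · obtain ⟨t, ht⟩ := pv_split string "their " h7
    exact pv_matched "their " string 6 (by decide) t ht
      (by rw [ht]; exact pv_walk_w6 t)
  · obtain ⟨t, ht⟩ := pv_split string "your " h8
    exact pv_matched "your " string 5 (by decide) t ht
      (by rw [ht]; exact pv_walk_w7 t)
  · obtain ⟨t, ht⟩ := pv_split string "to " h9
    exact pv_matched "to " string 3 (by decide) t ht
      (by rw [ht]; exact pv_walk_w8 t)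
  · obtain ⟨t, ht⟩ := pv_split string "dr " h10
    exact pv_matched "dr " string 3 (by decide) t ht
      (by rw [ht]; exact pv_walk_w9 t)
  · obtain ⟨t, ht⟩ := pv_split string "sir " h11
    exact pv_matched "sir " string 4 (by decide) t ht
      (by rw [ht]; exact pv_walk_w10 t)
  · refine pv_fallthrough string ?_
    intro w hw
    unfold pvWordsA at hw
    simp only [List.mem_cons, List.not_mem_nil, or_false] at hw
    rcases hw with rfl | rfl | rfl | rfl | rfl | rfl | rfl | rfl | rfl | rfl | rfl
    exacts [h1, h2, h3, h4, h5, h6, h7, h8, h9, h10, h11]
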